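-- pv_equiv track=rewrite | github.com/MrBrantCode/unitest_baseline | mut_generate/mist_train_taco/taco_2167/solution.py | max_length_with_two_letters
-- ===== SOURCE A (Python) =====
-- def max_length_with_two_letters(n, words):
--     def count_letters(word):
--         letter_count = {}
--         for char in word:
--             if char in letter_count:
--                 letter_count[char] += 1
--             else:
--                 letter_count[char] = 1
--         return letter_count
--
--     valid_words = []
--     for word in words:
--         letter_count = count_letters(word)
--         if 1 <= len(letter_count) <= 2:
--             valid_words.append(letter_count)
--
--     eng = 'abcdefghijklmnopqrstuvwxyz'
--     max_length = 0
--
--     for i in range(26):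
--         for j in range(i + 1, 26):
--             current_sum = 0
--             for word_count in valid_words:
--                 if eng[i] in word_count and eng[j] in word_count:
--                     current_sum += word_count[eng[i]] + word_count[eng[j]]
--                 elif eng[i] in word_count and len(word_count) == 1:
--                     current_sum += word_count[eng[i]]
--                 elif eng[j] in word_count and len(word_count) == 1:
--                     current_sum += word_count[eng[j]]
--             max_length = max(current_sum, max_length)
--
--     return max_length
-- ===== SOURCE B (Python) =====
-- def max_length_with_two_letters(n, words):
--     # One pass groups duplicate words, one pass over the distinct words builds
--     # per-letter and per-letter-pair length totals, combined once per pair.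
--     eng = 'abcdefghijklmnopqrstuvwxyz'
--     multiplicity = {}
--     for word in words:
--         multiplicity[word] = multiplicity.get(word, 0) + 1
--     single = {}
--     pair = {}
--     for word, mult in multiplicity.items():
--         distinct = sorted(set(word))
--         if len(distinct) == 1 and 97 <= ord(distinct[0]) <= 122:
--             c = distinct[0]
--             single[c] = single.get(c, 0) + len(word) * mult
--         elif len(distinct) == 2 and 97 <= ord(distinct[0]) <= 122 and 97 <= ord(distinct[1]) <= 122:
--             key = (distinct[0], distinct[1])
--             pair[key] = pair.get(key, 0) + len(word) * mult
--     best = 0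
--     for i in range(26):
--         for j in range(i + 1, 26):
--             total = single.get(eng[i], 0) + single.get(eng[j], 0) + pair.get((eng[i], eng[j]), 0)
--             if total > best:
--                 best = total
--     return best
-- ===== Notes on version B (the rewrite author's own statement) =====
-- stated objective: faster
-- what changed: B groups duplicate words with a multiplicity dict, classifies each distinct word once into per-letter and per-letter-pair length totals, and combines the totals once per 26x26 pair, instead of A rescanning every valid word's letter-count dict for each of the 325 letter pairs.
import Mathlib
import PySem

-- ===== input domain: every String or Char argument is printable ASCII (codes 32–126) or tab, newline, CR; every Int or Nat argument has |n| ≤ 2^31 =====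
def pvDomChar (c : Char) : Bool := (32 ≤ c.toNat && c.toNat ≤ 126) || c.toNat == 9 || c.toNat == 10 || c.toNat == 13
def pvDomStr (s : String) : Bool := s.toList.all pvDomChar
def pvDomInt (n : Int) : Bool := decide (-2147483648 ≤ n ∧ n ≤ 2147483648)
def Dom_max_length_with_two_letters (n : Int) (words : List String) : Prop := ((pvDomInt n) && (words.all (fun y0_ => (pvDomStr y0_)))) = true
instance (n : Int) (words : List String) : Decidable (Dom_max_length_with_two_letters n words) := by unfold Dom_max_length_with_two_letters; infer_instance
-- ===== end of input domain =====

-- B replaces A's per-pair rescan of all words by grouping duplicate words and one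
-- pass building per-letter / per-letter-pair length totals, combined once per pair
-- (objective: faster).

-- ===== PORT A =====
-- A's inner helper count_letters(word)
def pvCountLetters (w : List Char) : PySem.Dict Char Int :=
  w.foldl (fun d c =>
    if d.contains c then d.insert c (d.getD c 0 + 1) else d.insert c 1)
    PySem.Dict.empty

def pvEng : List Char := "abcdefghijklmnopqrstuvwxyz".toList

def max_length_with_two_letters (n : Int) (words : List String) : Int :=
  let valid_words : List (PySem.Dict Char Int) := words.foldl (fun acc word =>
      let lc := pvCountLetters word.toList
      if 1 ≤ lc.size ∧ lc.size ≤ 2 then acc ++ [lc] else acc) []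
  (PySem.List.pyRange 0 26).foldl (fun max_length i =>
    (PySem.List.pyRange (i + 1) 26).foldl (fun max_length j =>
      let ci := PySem.List.pyGetD pvEng i ' '
      let cj := PySem.List.pyGetD pvEng j ' '
      let current_sum := valid_words.foldl (fun s d =>
        if d.contains ci ∧ d.contains cj then s + (d.getD ci 0 + d.getD cj 0)
        else if d.contains ci ∧ d.size = 1 then s + d.getD ci 0
        else if d.contains cj ∧ d.size = 1 then s + d.getD cj 0
        else s) 0
      max current_sum max_length) max_length) 0

-- ===== PORT B =====
-- B's second loop body: classify one distinct word (with its multiplicity) into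
-- the single-letter / letter-pair totals
def pvAltStep (st : PySem.Dict Char Int × PySem.Dict (Char × Char) Int) (it : String × Int) :
    PySem.Dict Char Int × PySem.Dict (Char × Char) Int :=
  match PySem.List.sorted (PySem.Set.ofList it.1.toList) (fun x => x) with
  | [c] =>
      if 97 ≤ c.toNat ∧ c.toNat ≤ 122 then
        (st.1.insert c (st.1.getD c 0 + PySem.Str.len it.1 * it.2), st.2)
      else st
  | [c1, c2] =>
      if (97 ≤ c1.toNat ∧ c1.toNat ≤ 122) ∧ (97 ≤ c2.toNat ∧ c2.toNat ≤ 122) then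
        (st.1, st.2.insert (c1, c2) (st.2.getD (c1, c2) 0 + PySem.Str.len it.1 * it.2))
      else st
  | _ => st

def max_length_with_two_letters_alt (n : Int) (words : List String) : Int :=
  let multiplicity : PySem.Dict String Int :=
    words.foldl (fun d word => d.insert word (d.getD word 0 + 1)) PySem.Dict.empty
  let tabs := multiplicity.items.foldl pvAltStep (PySem.Dict.empty, PySem.Dict.empty)
  (PySem.List.pyRange 0 26).foldl (fun best i =>
    (PySem.List.pyRange (i + 1) 26).foldl (fun best j =>
      let ci := PySem.List.pyGetD pvEng i ' '
      let cj := PySem.List.pyGetD pvEng j ' '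
      let total := tabs.1.getD ci 0 + tabs.1.getD cj 0 + tabs.2.getD (ci, cj) 0
      if total > best then total else best) best) 0

-- ===== PRECONDITION & SPEC =====
def Spec_max_length_with_two_letters (n : Int) (words : List String) (out : Int) : Prop := out = max_length_with_two_letters_alt n words
instance (n : Int) (words : List String) (out : Int) : Decidable (Spec_max_length_with_two_letters n words out) := by unfold Spec_max_length_with_two_letters; infer_instance

-- ===== CLAIM (what is proved, stated in full; the proofs are below) =====
def Claim_equal_max_length_with_two_letters : Prop := ∀ (n : Int) (words : List String), Dom_max_length_with_two_letters n words → Spec_max_length_with_two_letters n words (max_length_with_two_letters n words)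

-- ===== LEMMAS AND PROOFS =====

-- B's per-word contribution to single[c]
def pvBS (c : Char) (word : String) : Int :=
  match PySem.List.sorted (PySem.Set.ofList word.toList) (fun x => x) with
  | [a] => if (97 ≤ a.toNat ∧ a.toNat ≤ 122) ∧ a = c then PySem.Str.len word else 0
  | _ => 0

-- B's per-word contribution to pair[(c1,c2)]
def pvBP (c1 c2 : Char) (word : String) : Int :=
  match PySem.List.sorted (PySem.Set.ofList word.toList) (fun x => x) with
  | [a, b] => if ((97 ≤ a.toNat ∧ a.toNat ≤ 122) ∧ (97 ≤ b.toNat ∧ b.toNat ≤ 122)) ∧ (a, b) = (c1, c2)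
      then PySem.Str.len word else 0
  | _ => 0

-- A's per-pair contribution of one valid dict
def pvContribA (ci cj : Char) (d : PySem.Dict Char Int) : Int :=
  if d.contains ci ∧ d.contains cj then d.getD ci 0 + d.getD cj 0
  else if d.contains ci ∧ d.size = 1 then d.getD ci 0
  else if d.contains cj ∧ d.size = 1 then d.getD cj 0
  else 0

-- A's per-pair contribution of one word (validity test included)
def pvContribW (ci cj : Char) (word : String) : Int :=
  if 1 ≤ (pvCountLetters word.toList).size ∧ (pvCountLetters word.toList).size ≤ 2 then
    pvContribA ci cj (pvCountLetters word.toList)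
  else 0

lemma pvCountLetters_eq_counter (w : List Char) : pvCountLetters w = PySem.Dict.counter w := by
  rw [pvCountLetters, ← PySem.Dict.foldl_insert_getD_add_one_eq_counter]
  apply PySem.List.foldl_congr_mem
  intro d c _
  by_cases h : d.contains c
  · simp [h]
  · simp only [Bool.not_eq_true] at h
    simp [h, PySem.Dict.getD_of_not_contains d 0 h]

lemma pvEng_get (k : Nat) (hk : k < 26) : (PySem.List.pyGetD pvEng (k : Int) ' ').toNat = 97 + k := by
  revert hk; revert k; decide

lemma pvStep_single (s : PySem.Dict Char Int) (p : PySem.Dict (Char × Char) Int) (it : String × Int) (c : Char) :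
    (pvAltStep (s, p) it).1.getD c 0 = s.getD c 0 + it.2 * pvBS c it.1 := by
  unfold pvAltStep pvBS
  cases hS : PySem.List.sorted (PySem.Set.ofList it.1.toList) (fun x => x) with
  | nil => simp
  | cons a t =>
    cases t with
    | nil =>
      by_cases hl : 97 ≤ a.toNat ∧ a.toNat ≤ 122
      · by_cases hac : a = c
        · subst hac; simp [hl, PySem.Dict.getD_insert]; ring
        · simp [hl, hac, PySem.Dict.getD_insert, Ne.symm hac]
      · simp [hl]
    | cons b t2 =>
      cases t2 with
      | nil =>
        by_cases hl : (97 ≤ a.toNat ∧ a.toNat ≤ 122) ∧ (97 ≤ b.toNat ∧ b.toNat ≤ 122)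
        · simp [hl]
        · simp [hl]
      | cons d t3 => simp

lemma pvStep_pair (s : PySem.Dict Char Int) (p : PySem.Dict (Char × Char) Int) (it : String × Int) (c1 c2 : Char) :
    (pvAltStep (s, p) it).2.getD (c1, c2) 0 = p.getD (c1, c2) 0 + it.2 * pvBP c1 c2 it.1 := by
  unfold pvAltStep pvBP
  cases hS : PySem.List.sorted (PySem.Set.ofList it.1.toList) (fun x => x) with
  | nil => simp
  | cons a t =>
    cases t with
    | nil =>
      by_cases hl : 97 ≤ a.toNat ∧ a.toNat ≤ 122
      · simp [hl]
      · simp [hl]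
    | cons b t2 =>
      cases t2 with
      | nil =>
        by_cases hl : (97 ≤ a.toNat ∧ a.toNat ≤ 122) ∧ (97 ≤ b.toNat ∧ b.toNat ≤ 122)
        · by_cases hk : (a, b) = (c1, c2)
          · injection hk with hk1 hk2; subst hk1; subst hk2
            simp [hl, PySem.Dict.getD_insert]; ring
          · simp [hl, hk, PySem.Dict.getD_insert, Ne.symm hk]
        · simp [hl]
      | cons d t3 => simp

lemma pvAlt_single (ws : List (String × Int)) (s : PySem.Dict Char Int)
    (p : PySem.Dict (Char × Char) Int) (c : Char) :
    ((ws.foldl pvAltStep (s, p)).1).getD c 0 = s.getD c 0 + (ws.map (fun it => it.2 * pvBS c it.1)).sum := by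
  induction ws generalizing s p with
  | nil => simp
  | cons w ws ih =>
    simp only [List.foldl_cons, List.map_cons, List.sum_cons]
    have hp : pvAltStep (s, p) w = ((pvAltStep (s, p) w).1, (pvAltStep (s, p) w).2) := rfl
    rw [hp, ih, pvStep_single]
    ring

lemma pvAlt_pair (ws : List (String × Int)) (s : PySem.Dict Char Int)
    (p : PySem.Dict (Char × Char) Int) (c1 c2 : Char) :
    ((ws.foldl pvAltStep (s, p)).2).getD (c1, c2) 0 = p.getD (c1, c2) 0 + (ws.map (fun it => it.2 * pvBP c1 c2 it.1)).sum := by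
  induction ws generalizing s p with
  | nil => simp
  | cons w ws ih =>
    simp only [List.foldl_cons, List.map_cons, List.sum_cons]
    have hp : pvAltStep (s, p) w = ((pvAltStep (s, p) w).1, (pvAltStep (s, p) w).2) := rfl
    rw [hp, ih, pvStep_pair]
    ring

lemma pvCountTwo (w : List Char) (a b : Char) (hab : a ≠ b) (h : ∀ x ∈ w, x = a ∨ x = b) :
    w.count a + w.count b = w.length := by
  induction w with
  | nil => simp
  | cons x t ih =>
    have ht : ∀ y ∈ t, y = a ∨ y = b := fun y hy => h y (by simp [hy])
    have hi := ih ht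
    rcases h x (by simp) with rfl | rfl <;>
      simp [List.count_cons, hab, Ne.symm hab] <;> omega

lemma pvPerWord (c1 c2 : Char) (word : String)
    (h1 : 97 ≤ c1.toNat) (h12 : c1.toNat < c2.toNat) (h2 : c2.toNat ≤ 122) :
    pvContribW c1 c2 word = pvBS c1 word + pvBS c2 word + pvBP c1 c2 word := by
  have hc12 : c1 ≠ c2 := by intro h; rw [h] at h12; omega
  unfold pvContribW pvBS pvBP
  rw [pvCountLetters_eq_counter]
  have hsize : (PySem.Dict.counter word.toList).size = (PySem.Set.ofList word.toList).length := by
    have := congrArg List.length (PySem.Dict.keys_counter word.toList)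
    simpa [PySem.Dict.keys, PySem.Dict.size] using this
  have hlenS := (PySem.List.sorted_perm (PySem.Set.ofList word.toList) (fun x => x) false).length_eq
  have hmem : ∀ c : Char, c ∈ PySem.List.sorted (PySem.Set.ofList word.toList) (fun x => x) ↔ c ∈ word.toList := by
    intro c; rw [PySem.List.mem_sorted, PySem.Set.mem_ofList]
  have hpw := PySem.List.sorted_ofList_pairwise_lt (word.toList)
  have hcontains : ∀ c : Char, (PySem.Dict.counter word.toList).contains c = word.toList.contains c :=
    PySem.Dict.contains_counter word.toList
  cases hS : PySem.List.sorted (PySem.Set.ofList word.toList) (fun x => x) with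
  | nil =>
    rw [hS] at hlenS
    simp only [hsize, ← hlenS]
    norm_num
  | cons a t =>
    rw [hS] at hlenS hmem
    cases t with
    | nil =>
      -- exactly one distinct char a; size = 1
      have hsz : (PySem.Dict.counter word.toList).size = 1 := by rw [hsize, ← hlenS]; rfl
      have haw : a ∈ word.toList := (hmem a).mp (by simp)
      have honly : ∀ x ∈ word.toList, x = a := by
        intro x hx
        have := (hmem x).mpr hx; simpa using this
      by_cases hac1 : a = c1
      · subst hac1
        have hc2 : ¬ (c2 ∈ word.toList) := fun h => hc12 ((honly c2 h).symm)
        have hcnt : word.toList.count a = word.toList.length :=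
          List.count_eq_length.mpr (fun b hb => (honly b hb).symm)
        have hb1 : word.toList.contains a = true := by simpa [List.contains_iff_mem] using haw
        have hb2 : word.toList.contains c2 = false := by simp [List.contains_iff_mem, hc2]
        have hu : a.toNat ≤ 122 := by omega
        simp only [pvContribA, hsz, hcontains, PySem.Dict.getD_counter]
        simp [hb1, hb2, haw, hc2, hcnt, hc12, h1, hu]
      · by_cases hac2 : a = c2
        · subst hac2
          have hc1 : ¬ (c1 ∈ word.toList) := fun h => hc12 (honly c1 h)
          have hcnt : word.toList.count a = word.toList.length :=
            List.count_eq_length.mpr (fun b hb => (honly b hb).symm)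
          have hb1 : word.toList.contains c1 = false := by simp [List.contains_iff_mem, hc1]
          have hb2 : word.toList.contains a = true := by simpa [List.contains_iff_mem] using haw
          have hl : 97 ≤ a.toNat := by omega
          simp only [pvContribA, hsz, hcontains, PySem.Dict.getD_counter]
          simp [hb1, hb2, haw, hc1, hcnt, hac1, h2, hl]
        · have hp1 : c1 ∉ word.toList := fun h => hac1 ((honly c1 h).symm)
          have hp2 : c2 ∉ word.toList := fun h => hac2 ((honly c2 h).symm)
          have hn1 : word.toList.contains c1 = false := by simp [List.contains_iff_mem, hp1]
          have hn2 : word.toList.contains c2 = false := by simp [List.contains_iff_mem, hp2]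
          simp only [pvContribA, hsz, hcontains, PySem.Dict.getD_counter]
          simp [hn1, hn2, hp1, hp2, hac1, hac2]
    | cons b t2 =>
      cases t2 with
      | nil =>
        -- exactly two distinct chars a < b; size = 2
        have hsz : (PySem.Dict.counter word.toList).size = 2 := by rw [hsize, ← hlenS]; rfl
        rw [hS] at hpw
        have hab : a < b := (List.pairwise_cons.mp hpw).1 b (by simp)
        have habn : a.toNat < b.toNat := by simpa [Char.lt_def] using hab
        have habne : a ≠ b := fun h => by rw [h] at habn; omega
        have haw : a ∈ word.toList := (hmem a).mp (by simp)
        have hbw : b ∈ word.toList := (hmem b).mp (by simp)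
        have honly : ∀ x ∈ word.toList, x = a ∨ x = b := by
          intro x hx
          have := (hmem x).mpr hx; simpa using this
        by_cases hcc : c1 ∈ word.toList ∧ c2 ∈ word.toList
        · have e1 : c1 = a ∧ c2 = b := by
            rcases honly c1 hcc.1 with rfl | rfl <;> rcases honly c2 hcc.2 with rfl | rfl
            · omega
            · exact ⟨rfl, rfl⟩
            · omega
            · omega
          obtain ⟨rfl, rfl⟩ := e1
          have hcnt := pvCountTwo word.toList c1 c2 hc12 honly
          have hb1 : word.toList.contains c1 = true := by simpa [List.contains_iff_mem] using haw
          have hb2 : word.toList.contains c2 = true := by simpa [List.contains_iff_mem] using hbw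
          have hu : c1.toNat ≤ 122 := by omega
          have hl : 97 ≤ c2.toNat := by omega
          simp only [pvContribA, hsz, hcontains, PySem.Dict.getD_counter]
          simp [hb1, hb2, haw, hbw, h1, h2, hu, hl]
          have hlen : word.toList.length = word.length := by simp
          push_cast
          omega
        · have hne : ¬ ((a, b) = (c1, c2)) := by
            intro h; injection h with e1 e2; subst e1; subst e2; exact hcc ⟨haw, hbw⟩
          simp only [pvContribA, hsz, hcontains, PySem.Dict.getD_counter]
          rcases not_and_or.mp hcc with hn | hn
          · have hb1 : word.toList.contains c1 = false := by simp [List.contains_iff_mem, hn]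
            simp [hb1, hn, hne]
          · have hb2 : word.toList.contains c2 = false := by simp [List.contains_iff_mem, hn]
            simp [hb2, hn, hne]
      | cons d t3 =>
        -- three or more distinct chars: not a valid word
        have hsz : ¬ (1 ≤ (PySem.Dict.counter word.toList).size ∧ (PySem.Dict.counter word.toList).size ≤ 2) := by
          rw [hsize, ← hlenS]; simp [List.length_cons]
        simp [hsz]

lemma pvAside (ci cj : Char) (ws : List String) (acc : List (PySem.Dict Char Int)) (s0 : Int) :
    (ws.foldl (fun acc word =>
        if 1 ≤ (pvCountLetters word.toList).size ∧ (pvCountLetters word.toList).size ≤ 2 then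
          acc ++ [pvCountLetters word.toList] else acc) acc).foldl (fun s d =>
        if d.contains ci ∧ d.contains cj then s + (d.getD ci 0 + d.getD cj 0)
        else if d.contains ci ∧ d.size = 1 then s + d.getD ci 0
        else if d.contains cj ∧ d.size = 1 then s + d.getD cj 0
        else s) s0
    = acc.foldl (fun s d =>
        if d.contains ci ∧ d.contains cj then s + (d.getD ci 0 + d.getD cj 0)
        else if d.contains ci ∧ d.size = 1 then s + d.getD ci 0
        else if d.contains cj ∧ d.size = 1 then s + d.getD cj 0
        else s) s0 + (ws.map (pvContribW ci cj)).sum := by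
  induction ws generalizing acc with
  | nil => simp
  | cons w ws ih =>
    simp only [List.foldl_cons, List.map_cons, List.sum_cons]
    rw [ih]
    by_cases h : 1 ≤ (pvCountLetters w.toList).size ∧ (pvCountLetters w.toList).size ≤ 2
    · rw [if_pos h, List.foldl_append]
      simp only [List.foldl_cons, List.foldl_nil, pvContribW, if_pos h]
      unfold pvContribA; split_ifs <;> ring
    · rw [if_neg h]
      simp only [pvContribW, if_neg h]
      ring

lemma pvSumDedup (ws : List String) (f : String → Int) :
    ((PySem.Set.ofList ws).map (fun w => (ws.count w : Int) * f w)).sum = (ws.map f).sum := by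
  have hnd : (PySem.Set.ofList ws).Nodup := PySem.Set.nodup_ofList ws
  rw [← List.sum_toFinset _ hnd, Finset.sum_list_map_count]
  apply Finset.sum_congr
  · ext x; simp [List.mem_toFinset, PySem.Set.mem_ofList]
  · intro x hx; simp [nsmul_eq_mul]

lemma pvPairTotal (words : List String) (ci cj : Char)
    (h1 : 97 ≤ ci.toNat) (h12 : ci.toNat < cj.toNat) (h2 : cj.toNat ≤ 122) :
    (words.map (pvContribW ci cj)).sum
      = ((PySem.Dict.counter words).items.foldl pvAltStep (PySem.Dict.empty, PySem.Dict.empty)).1.getD ci 0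
        + ((PySem.Dict.counter words).items.foldl pvAltStep (PySem.Dict.empty, PySem.Dict.empty)).1.getD cj 0
        + ((PySem.Dict.counter words).items.foldl pvAltStep (PySem.Dict.empty, PySem.Dict.empty)).2.getD (ci, cj) 0 := by
  rw [pvAlt_single, pvAlt_single, pvAlt_pair]
  simp only [PySem.Dict.getD_empty, zero_add]
  rw [PySem.Dict.items_counter]
  simp only [List.map_map, Function.comp_def]
  rw [pvSumDedup, pvSumDedup, pvSumDedup]
  rw [← PySem.List.sum_map_add_int, ← PySem.List.sum_map_add_int]
  exact congrArg List.sum (List.map_congr_left (fun w _ => pvPerWord ci cj w h1 h12 h2))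

-- ===== VERDICT (by name: the statement is the Claim_ definition above) =====
theorem max_length_with_two_letters_spec : Claim_equal_max_length_with_two_letters := by
  intro n words _
  unfold Spec_max_length_with_two_letters max_length_with_two_letters max_length_with_two_letters_alt
  dsimp only
  apply PySem.List.foldl_congr_mem
  intro acc i hi
  apply PySem.List.foldl_congr_mem
  intro acc2 j hj
  rw [PySem.List.mem_pyRange_one] at hi hj
  have hi0 : 0 ≤ i := hi.1
  have hj0 : 0 ≤ j := le_trans (by omega) hj.1
  have hieq : (i.toNat : Int) = i := Int.toNat_of_nonneg hi0
  have hjeq : (j.toNat : Int) = j := Int.toNat_of_nonneg hj0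
  have hilt : i.toNat < 26 := by omega
  have hjlt : j.toNat < 26 := by omega
  have hij : i.toNat < j.toNat := by omega
  have hci := pvEng_get i.toNat hilt
  have hcj := pvEng_get j.toNat hjlt
  rw [hieq] at hci
  rw [hjeq] at hcj
  set ci := PySem.List.pyGetD pvEng i ' ' with hcidef
  set cj := PySem.List.pyGetD pvEng j ' ' with hcjdef
  have hsum : (words.foldl (fun acc word =>
        if 1 ≤ (pvCountLetters word.toList).size ∧ (pvCountLetters word.toList).size ≤ 2 then
          acc ++ [pvCountLetters word.toList] else acc) []).foldl (fun s d =>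
        if d.contains ci ∧ d.contains cj then s + (d.getD ci 0 + d.getD cj 0)
        else if d.contains ci ∧ d.size = 1 then s + d.getD ci 0
        else if d.contains cj ∧ d.size = 1 then s + d.getD cj 0
        else s) 0
      = (((words.foldl (fun d word => d.insert word (d.getD word 0 + 1)) PySem.Dict.empty).items).foldl
            pvAltStep (PySem.Dict.empty, PySem.Dict.empty)).1.getD ci 0
        + (((words.foldl (fun d word => d.insert word (d.getD word 0 + 1)) PySem.Dict.empty).items).foldl
            pvAltStep (PySem.Dict.empty, PySem.Dict.empty)).1.getD cj 0
        + (((words.foldl (fun d word => d.insert word (d.getD word 0 + 1)) PySem.Dict.empty).items).foldl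
            pvAltStep (PySem.Dict.empty, PySem.Dict.empty)).2.getD (ci, cj) 0 := by
    rw [PySem.Dict.foldl_insert_getD_add_one_eq_counter]
    rw [pvAside]
    simp only [List.foldl_nil, zero_add]
    exact pvPairTotal words ci cj (by omega) (by omega) (by omega)
  rw [hsum]
  rw [max_def]
  split_ifs <;> omega
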